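-- pv_equiv track=rewrite | github.com/Delean-Mafra/faculdade | hackerrank/Piling Up.py | can_stack
-- ===== SOURCE A (Python) =====
-- from collections import deque
--
-- def can_stack(blocks):
--     dq = deque(blocks)
--     last = 10**18
--     while dq:
--         left = dq[0]
--         right = dq[-1]
--         # both ends are valid choices (not larger than last)
--         if left <= last and right <= last:
--             # choose the larger to keep pile non-increasing
--             if left >= right:
--                 dq.popleft()
--                 last = left
--             else:
--                 dq.pop()
--                 last = right
--         elif left <= last:
--             dq.popleft()
--             last = left
--         elif right <= last:
--             dq.pop()
--             last = right
--         else: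
--             return False
--     return True
-- ===== SOURCE B (Python) =====
-- def can_stack(blocks):
--     i = 0
--     n = len(blocks)
--     while i + 1 < n and blocks[i] >= blocks[i + 1]:
--         i += 1
--     while i + 1 < n and blocks[i] <= blocks[i + 1]:
--         i += 1
--     return i + 1 >= n
-- ===== Notes on version B (the rewrite author's own statement) =====
-- stated objective: simpler
-- what changed: Replaces the shrink-from-both-ends deque greedy with a single left-to-right index scan that checks the list is a non-increasing run followed by a non-decreasing run (a 'valley'); A's 10**18 sentinel never binds on the stated |n| <= 2^31 domain.
import Mathlib
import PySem

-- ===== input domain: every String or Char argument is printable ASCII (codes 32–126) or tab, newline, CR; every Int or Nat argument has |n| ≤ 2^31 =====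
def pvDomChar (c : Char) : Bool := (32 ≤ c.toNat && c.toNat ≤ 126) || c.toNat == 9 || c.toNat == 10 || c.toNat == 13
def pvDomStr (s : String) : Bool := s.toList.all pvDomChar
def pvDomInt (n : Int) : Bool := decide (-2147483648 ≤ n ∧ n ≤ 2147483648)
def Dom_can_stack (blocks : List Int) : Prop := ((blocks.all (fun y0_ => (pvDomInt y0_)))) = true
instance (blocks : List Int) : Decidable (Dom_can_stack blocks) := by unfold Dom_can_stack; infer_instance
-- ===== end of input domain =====

-- B replaces A's shrink-from-both-ends deque greedy by a single forward scan checking a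
-- non-increasing run followed by a non-decreasing run (simpler; same O(n) cost).


-- ===== PORT A =====
-- the while loop of A: dq is the deque, `last` the last-placed block;
-- left = dq[0], right = dq[-1]; popleft = tail, pop = dropLast
def canStackLoop (dq : List Int) (last : Int) : Bool :=
  match dq with
  | [] => true
  | x :: xs =>
    let left := x
    let right := (x :: xs).getLastD 0
    if left ≤ last ∧ right ≤ last then
      if right ≤ left then canStackLoop xs left
      else canStackLoop ((x :: xs).dropLast) right
    else if left ≤ last then canStackLoop xs left
    else if right ≤ last then canStackLoop ((x :: xs).dropLast) right
    else false
termination_by dq.length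
decreasing_by all_goals simp [List.length_dropLast]

def can_stack (blocks : List Int) : Bool := canStackLoop blocks (10 ^ 18)

-- ===== PORT B =====
-- first while loop of B: advance while blocks[i] >= blocks[i+1]
def descendPhase : List Int → List Int
  | a :: b :: t => if b ≤ a then descendPhase (b :: t) else a :: b :: t
  | l => l

-- second while loop of B: advance while blocks[i] <= blocks[i+1]; true iff the end is reached
def ascendPhase : List Int → Bool
  | a :: b :: t => if a ≤ b then ascendPhase (b :: t) else false
  | _ => true

def can_stack_alt (blocks : List Int) : Bool := ascendPhase (descendPhase blocks)

-- ===== PRECONDITION & SPEC =====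
def Spec_can_stack (blocks : List Int) (out : Bool) : Prop := out = can_stack_alt blocks
instance (blocks : List Int) (out : Bool) : Decidable (Spec_can_stack blocks out) := by unfold Spec_can_stack; infer_instance

-- ===== CLAIM (what is proved, stated in full; the proofs are below) =====
def Claim_equal_can_stack : Prop := ∀ (blocks : List Int), Dom_can_stack blocks → Spec_can_stack blocks (can_stack blocks)

-- ===== LEMMAS AND PROOFS =====

theorem ascend_head_le_getLast (a : Int) (t : List Int) :
    ascendPhase (a :: t) = true → a ≤ (a :: t).getLastD 0 := by
  induction t generalizing a with
  | nil => intro _; simp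
  | cons b t ih =>
    intro h
    simp only [ascendPhase] at h
    split at h
    · next hab => exact le_trans hab (by simpa using ih b h)
    · exact absurd h (by simp)

theorem ascend_append (a : Int) (t : List Int) (r : Int) :
    ascendPhase ((a :: t) ++ [r]) =
      (ascendPhase (a :: t) && decide ((a :: t).getLastD 0 ≤ r)) := by
  induction t generalizing a with
  | nil => simp [ascendPhase]
  | cons b t ih =>
    simp only [List.cons_append, ascendPhase]
    by_cases hab : a ≤ b
    · simpa [hab] using ih b
    · simp [hab]

theorem alt_cons_down (a b : Int) (t : List Int) (h : b ≤ a) :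
    can_stack_alt (a :: b :: t) = can_stack_alt (b :: t) := by
  simp [can_stack_alt, descendPhase, h]

theorem alt_cons_up (a b : Int) (t : List Int) (h : ¬ b ≤ a) :
    can_stack_alt (a :: b :: t) = ascendPhase (a :: b :: t) := by
  simp [can_stack_alt, descendPhase, h]

theorem alt_append (a : Int) (t : List Int) (r : Int) (h : a < r) :
    can_stack_alt ((a :: t) ++ [r]) =
      (can_stack_alt (a :: t) && decide ((a :: t).getLastD 0 ≤ r)) := by
  induction t generalizing a with
  | nil =>
    simp [can_stack_alt, descendPhase, ascendPhase, not_le.mpr h, le_of_lt h]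
  | cons b t ih =>
    by_cases hba : b ≤ a
    · simp only [List.cons_append]
      rw [alt_cons_down a b (t ++ [r]) hba, alt_cons_down a b t hba]
      simpa using ih b (lt_of_le_of_lt hba h)
    · simp only [List.cons_append]
      rw [alt_cons_up a b (t ++ [r]) hba, alt_cons_up a b t hba]
      simpa [List.cons_append] using ascend_append a (b :: t) r

-- loop invariant: the greedy equals "valley ∧ both current ends ≤ last"
theorem loop_cons (x : Int) (xs : List Int) (last : Int) :
    canStackLoop (x :: xs) last =
      (if x ≤ last ∧ (x :: xs).getLastD 0 ≤ last then
        (if (x :: xs).getLastD 0 ≤ x then canStackLoop xs x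
         else canStackLoop ((x :: xs).dropLast) ((x :: xs).getLastD 0))
       else if x ≤ last then canStackLoop xs x
       else if (x :: xs).getLastD 0 ≤ last then canStackLoop ((x :: xs).dropLast) ((x :: xs).getLastD 0)
       else false) := by
  rw [canStackLoop]

theorem getLastD_cons_irrel (a : Int) (t : List Int) (d d' : Int) :
    (a :: t).getLastD d = (a :: t).getLastD d' := by
  cases t with
  | nil => rfl
  | cons b t => simp only [List.getLastD_cons]

theorem getLastD_cons_mem (a : Int) (t : List Int) (d : Int) :
    (a :: t).getLastD d ∈ a :: t := by
  induction t generalizing a d with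
  | nil => simp
  | cons b t ih =>
    rw [List.getLastD_cons]
    exact List.mem_cons_of_mem a (ih b a)

theorem loop_eq (n : Nat) : ∀ (dq : List Int) (last : Int), dq.length ≤ n →
    canStackLoop dq last =
      (can_stack_alt dq && decide (dq.headD last ≤ last) && decide (dq.getLastD last ≤ last)) := by
  induction n with
  | zero =>
    intro dq last h
    have : dq = [] := List.eq_nil_of_length_eq_zero (Nat.le_zero.mp h)
    subst this; simp [canStackLoop, can_stack_alt, descendPhase, ascendPhase]
  | succ n ih =>
    intro dq last h
    match dq with
    | [] => simp [canStackLoop, can_stack_alt, descendPhase, ascendPhase]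
    | [x] =>
      rw [canStackLoop]
      by_cases hx : x ≤ last
      · simp [hx, ih [] x (by simp), can_stack_alt, descendPhase, ascendPhase]
      · simp [hx, can_stack_alt, descendPhase, ascendPhase]
    | x :: b :: t =>
      have hlen : (b :: t).length ≤ n := by simpa using Nat.succ_le_succ_iff.mp h
      obtain ⟨ys, z, hcat⟩ : ∃ ys z, b :: t = ys ++ [z] := by
        rcases List.eq_nil_or_concat (b :: t) with h' | ⟨ys, z, h'⟩
        · simp at h'
        · exact ⟨ys, z, by simpa [List.concat_eq_append] using h'⟩
      have hdq : x :: b :: t = (x :: ys) ++ [z] := by rw [hcat]; rfl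
      have hz0 : (x :: b :: t).getLastD 0 = z := by rw [hdq, List.getLastD_concat]
      have hzL : (x :: b :: t).getLastD last = z := by rw [hdq, List.getLastD_concat]
      have hzt : ∀ d : Int, (b :: t).getLastD d = z := by
        intro d; rw [hcat, List.getLastD_concat]
      have hdrop : (x :: b :: t).dropLast = x :: ys := by rw [hdq, List.dropLast_concat]
      have hylen : (x :: ys).length ≤ n := by
        have h2 := congrArg List.length hcat
        simp at h2 hlen ⊢
        omega
      rw [loop_cons, hz0, hzL, hdrop, List.headD_cons]
      by_cases hxl : x ≤ last
      · by_cases hzl : z ≤ last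
        · rw [if_pos ⟨hxl, hzl⟩, decide_eq_true hxl, decide_eq_true hzl,
              Bool.and_true, Bool.and_true]
          by_cases hzx : z ≤ x
          · -- pop left (left ≥ right)
            rw [if_pos hzx, ih (b :: t) x hlen, List.headD_cons, hzt x,
                decide_eq_true hzx, Bool.and_true]
            by_cases hbx : b ≤ x
            · rw [alt_cons_down x b t hbx, decide_eq_true hbx, Bool.and_true]
            · -- b > x ≥ z = last element of b :: t: the ascending check must fail
              have hasc : ascendPhase (b :: t) = false := by
                cases hb : ascendPhase (b :: t) with
                | true =>
                  have := ascend_head_le_getLast b t hb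
                  rw [hzt 0] at this
                  omega
                | false => rfl
              rw [alt_cons_up x b t hbx]
              simp [ascendPhase, le_of_lt (lt_of_not_ge hbx), hasc, hbx]
          · -- pop right (left < right)
            have hxz : x < z := lt_of_not_ge hzx
            rw [if_neg hzx, ih (x :: ys) z hylen, List.headD_cons,
                decide_eq_true (le_of_lt hxz), Bool.and_true]
            rw [hdq, alt_append x ys z hxz, getLastD_cons_irrel x ys z 0]
        · -- left ≤ last < right: popleft; both sides false
          rw [if_neg (by tauto), if_pos hxl, ih (b :: t) x hlen, hzt x]
          have h1 : ¬ z ≤ x := by omega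
          simp [h1, hzl]
      · by_cases hzl : z ≤ last
        · -- right ≤ last < left: pop right; both sides false
          rw [if_neg (by tauto), if_neg hxl, if_pos hzl,
              ih (x :: ys) z hylen, List.headD_cons]
          have h1 : ¬ x ≤ z := by omega
          simp [h1, hxl]
        · rw [if_neg (by tauto), if_neg hxl, if_neg hzl]
          simp [hxl]

theorem dom_bounds (blocks : List Int) (hd : Dom_can_stack blocks) :
    ∀ x ∈ blocks, x ≤ 10 ^ 18 := by
  intro x hx
  unfold Dom_can_stack at hd
  rw [List.all_eq_true] at hd
  have := hd x hx
  simp [pvDomInt] at this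
  omega

-- ===== VERDICT (by name: the statement is the Claim_ definition above) =====
theorem can_stack_spec : Claim_equal_can_stack := by
  intro blocks hd
  unfold Spec_can_stack
  rw [show can_stack blocks = canStackLoop blocks (10 ^ 18) from rfl,
      loop_eq blocks.length blocks (10 ^ 18) le_rfl]
  have hb := dom_bounds blocks hd
  cases blocks with
  | nil => simp [can_stack_alt, descendPhase, ascendPhase]
  | cons a t =>
    have h1 : (a :: t).headD (10 ^ 18 : Int) ≤ 10 ^ 18 := by
      simpa using hb a (by simp)
    have h2 : (a :: t).getLastD (10 ^ 18 : Int) ≤ 10 ^ 18 :=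
      hb _ (getLastD_cons_mem a t _)
    rw [decide_eq_true h1, decide_eq_true h2, Bool.and_true, Bool.and_true]
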